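-- pv_equiv track=rewrite | github.com/pypi-data/pypi-mirror-91 | packages/iob2/iob2-1.0.0.tar.gz/iob2-1.0.0/iob2/__init__.py | chunk_combine
-- ===== SOURCE A (Python) =====
-- def chunk_combine(sent_split_corpus, chunk_len):
-- 	sent_n = len(sent_split_corpus)
-- 	ret_corpus = []
-- 	chunk_buffer = []
-- 	for i in range(sent_n):
-- 		sent = sent_split_corpus[i]
-- 		if len(chunk_buffer) > 0:	# 最初の文はどのみち入れるのでチェックしない
-- 			if len(chunk_buffer) + len(sent) > chunk_len:
-- 				ret_corpus.append(chunk_buffer)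
-- 				chunk_buffer = []
-- 		for e in sent: chunk_buffer.append(e)
-- 	# 最後の文の処理
-- 	if len(chunk_buffer) > 0:
-- 		ret_corpus.append(chunk_buffer)
-- 		chunk_buffer = []
-- 	return ret_corpus
-- ===== SOURCE B (Python) =====
-- def chunk_combine(sent_split_corpus, chunk_len):
--     # Repeatedly split off the maximal prefix of sentences fitting the limit,
--     # then flatten it into one chunk (skipping token-empty chunks).
--     def split_prefix(sents):
--         # longest prefix whose token total stays within chunk_len
--         # (a sentence is always taken while the running total is 0)
--         total = 0
--         for j, s in enumerate(sents):
--             if total > 0 and total + len(s) > chunk_len: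
--                 return sents[:j], sents[j:]
--             total += len(s)
--         return sents, []
--     ret = []
--     rest = sent_split_corpus
--     while rest:
--         head, rest = split_prefix(rest)
--         chunk = [e for s in head for e in s]
--         if chunk:
--             ret.append(chunk)
--     return ret
-- ===== Notes on version B (the rewrite author's own statement) =====
-- stated objective: alternative
-- what changed: B replaces A's single token-appending pass with a flush buffer by an outer while-loop that repeatedly splits off the maximal prefix of whole sentences fitting the limit (a helper computing the cut index) and flattens each prefix into a chunk.
import Mathlib
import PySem

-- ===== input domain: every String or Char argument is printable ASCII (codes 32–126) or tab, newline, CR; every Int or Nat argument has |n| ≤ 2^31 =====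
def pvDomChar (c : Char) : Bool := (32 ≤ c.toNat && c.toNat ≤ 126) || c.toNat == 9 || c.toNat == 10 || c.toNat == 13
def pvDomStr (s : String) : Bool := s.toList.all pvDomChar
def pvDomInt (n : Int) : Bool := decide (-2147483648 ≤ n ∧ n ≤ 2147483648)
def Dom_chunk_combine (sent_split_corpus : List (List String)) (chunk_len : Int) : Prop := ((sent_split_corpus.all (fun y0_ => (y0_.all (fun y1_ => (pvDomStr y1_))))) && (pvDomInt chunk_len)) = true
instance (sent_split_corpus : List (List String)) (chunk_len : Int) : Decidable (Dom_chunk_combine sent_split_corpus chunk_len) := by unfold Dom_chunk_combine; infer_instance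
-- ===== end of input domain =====

-- B re-decomposes the task: instead of A's single token-appending pass with a flush buffer, it
-- repeatedly splits off the maximal fitting prefix of sentences and flattens it; same cost.

-- ===== PORT A =====
-- one iteration of A's for-loop: state = (ret_corpus, chunk_buffer)
def pvStepA (chunk_len : Int) (st : List (List String) × List String) (sent : List String) :
    List (List String) × List String :=
  let st' := if st.2.length > 0 ∧ (st.2.length : Int) + (sent.length : Int) > chunk_len
             then (st.1 ++ [st.2], ([] : List String)) else st
  (st'.1, sent.foldl (fun b e => b ++ [e]) st'.2)   -- for e in sent: chunk_buffer.append(e)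

def chunk_combine (sent_split_corpus : List (List String)) (chunk_len : Int) : List (List String) :=
  let st := sent_split_corpus.foldl (pvStepA chunk_len) ([], [])
  if st.2.length > 0 then st.1 ++ [st.2] else st.1

-- ===== PORT B =====
-- split_prefix's scan: total is the Int running token count, returns (sents[:j], sents[j:])
def pvSplit (chunk_len : Int) (total : Int) : List (List String) →
    List (List String) × List (List String)
  | [] => ([], [])
  | s :: r =>
    if total > 0 ∧ total + (s.length : Int) > chunk_len then ([], s :: r)
    else
      let p := pvSplit chunk_len (total + (s.length : Int)) r
      (s :: p.1, p.2)

theorem pvSplit_snd_le (chunk_len : Int) :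
    ∀ (total : Int) (l : List (List String)), (pvSplit chunk_len total l).2.length ≤ l.length := by
  intro total l
  induction l generalizing total with
  | nil => simp [pvSplit]
  | cons s r ih =>
    simp only [pvSplit]
    split_ifs with h
    · simp
    · exact le_trans (ih _) (Nat.le_succ _)

-- B's while-loop: split off a maximal prefix, flatten it, keep it if nonempty
def pvLoopB (chunk_len : Int) : List (List String) → List (List String)
  | [] => []
  | s :: r =>
    let p := pvSplit chunk_len 0 (s :: r)
    let chunk := p.1.flatMap id          -- [e for s in head for e in s]
    (if chunk ≠ [] then [chunk] else []) ++ pvLoopB chunk_len p.2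
termination_by l => l.length
decreasing_by
  simp only [pvSplit]
  have h0 : ¬ ((0 : Int) > 0 ∧ (0 : Int) + (s.length : Int) > chunk_len) := by
    intro h; exact absurd h.1 (by norm_num)
  rw [if_neg h0]
  exact Nat.lt_succ_of_le (pvSplit_snd_le chunk_len _ r)

def chunk_combine_alt (sent_split_corpus : List (List String)) (chunk_len : Int) : List (List String) :=
  pvLoopB chunk_len sent_split_corpus

-- ===== PRECONDITION & SPEC =====
def Spec_chunk_combine (sent_split_corpus : List (List String)) (chunk_len : Int) (out : List (List String)) : Prop := out = chunk_combine_alt sent_split_corpus chunk_len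
instance (sent_split_corpus : List (List String)) (chunk_len : Int) (out : List (List String)) : Decidable (Spec_chunk_combine sent_split_corpus chunk_len out) := by unfold Spec_chunk_combine; infer_instance

-- ===== CLAIM (what is proved, stated in full; the proofs are below) =====
def Claim_equal_chunk_combine : Prop := ∀ (sent_split_corpus : List (List String)) (chunk_len : Int), Dom_chunk_combine sent_split_corpus chunk_len → Spec_chunk_combine sent_split_corpus chunk_len (chunk_combine sent_split_corpus chunk_len)

-- ===== LEMMAS AND PROOFS =====

theorem foldl_append_tokens (sent buf : List String) :
    sent.foldl (fun b e => b ++ [e]) buf = buf ++ sent := by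
  induction sent generalizing buf with
  | nil => simp
  | cons a t ih => simp [List.foldl, ih]

-- ret_corpus only ever grows on the right: shift it out of the fold
theorem foldA_shift (cl : Int) :
    ∀ (rest : List (List String)) (ret : List (List String)) (buf : List String),
    rest.foldl (pvStepA cl) (ret, buf)
      = (ret ++ (rest.foldl (pvStepA cl) ([], buf)).1, (rest.foldl (pvStepA cl) ([], buf)).2) := by
  intro rest
  induction rest with
  | nil => intro ret buf; simp [List.foldl]
  | cons s r ih =>
    intro ret buf
    simp only [List.foldl]
    by_cases h : buf.length > 0 ∧ (buf.length : Int) + (s.length : Int) > cl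
    · have hA : pvStepA cl (ret, buf) s
          = (ret ++ [buf], s.foldl (fun b e => b ++ [e]) ([] : List String)) := by
        simp [pvStepA, if_pos h]
      have hB : pvStepA cl (([] : List (List String)), buf) s
          = ([buf], s.foldl (fun b e => b ++ [e]) ([] : List String)) := by
        simp [pvStepA, if_pos h]
      rw [hA, hB, ih (ret ++ [buf]) _, ih [buf] _]
      simp
    · have hA : pvStepA cl (ret, buf) s = (ret, s.foldl (fun b e => b ++ [e]) buf) := by
        simp only [pvStepA, if_neg h]
      have hB : pvStepA cl (([] : List (List String)), buf) s
          = ([], s.foldl (fun b e => b ++ [e]) buf) := by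
        simp only [pvStepA, if_neg h]
      rw [hA, hB, ih ret _]

-- A's result from remaining sentences `rest` and current buffer `buf`
def pvARes (cl : Int) (rest : List (List String)) (buf : List String) : List (List String) :=
  let st := rest.foldl (pvStepA cl) ([], buf)
  if st.2.length > 0 then st.1 ++ [st.2] else st.1

def pvEmit (x : List String) : List (List String) := if x ≠ [] then [x] else []

-- Main invariant: A's continuation equals B's split-then-recurse, flattening the prefix
theorem main_inv (cl : Int) :
    ∀ (rest : List (List String)) (buf : List String),
    pvARes cl rest buf
      = pvEmit (buf ++ (pvSplit cl (buf.length : Int) rest).1.flatMap id)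
        ++ pvLoopB cl (pvSplit cl (buf.length : Int) rest).2 := by
  intro rest
  induction rest with
  | nil =>
    intro buf
    simp only [pvARes, pvSplit, List.foldl, pvLoopB, pvEmit, List.flatMap_nil, List.append_nil]
    by_cases h : buf.length > 0
    · rw [if_pos h, if_pos (by simpa using List.length_pos_iff.mp h)]
      simp
    · rw [if_neg h]
      have : buf = [] := by
        cases buf with
        | nil => rfl
        | cons a t => exact absurd (by simp) h
      subst this; simp
  | cons s r ih =>
    intro buf
    have hfold : s.foldl (fun b e => b ++ [e]) ([] : List String) = s := by
      simpa using foldl_append_tokens s []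
    by_cases h : buf.length > 0 ∧ (buf.length : Int) + (s.length : Int) > cl
    · -- boundary: A flushes buf, starts buffer = s; B's split stops here
      have hi : (buf.length : Int) > 0 ∧ (buf.length : Int) + (s.length : Int) > cl :=
        ⟨by exact_mod_cast h.1, h.2⟩
      have hbuf : buf ≠ [] := List.length_pos_iff.mp h.1 |> List.ne_nil_of_length_pos ∘ (fun _ => h.1)
      have hA : pvARes cl (s :: r) buf = buf :: pvARes cl r s := by
        simp only [pvARes, List.foldl]
        have : pvStepA cl (([] : List (List String)), buf) s = ([buf], s) := by
          simp only [pvStepA, if_pos h]; simp [hfold]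
        rw [this, foldA_shift cl r [buf] s]
        simp only
        by_cases h2 : (r.foldl (pvStepA cl) ([], s)).2.length > 0
        · rw [if_pos h2, if_pos h2]; simp
        · rw [if_neg h2, if_neg h2]; simp
      rw [hA]
      simp only [pvSplit, if_pos hi]
      -- RHS: pvEmit buf ++ pvLoopB cl (s :: r); pvLoopB unfolds to the split at acc 0
      have hloop : pvLoopB cl (s :: r)
          = pvEmit (s ++ (pvSplit cl (s.length : Int) r).1.flatMap id)
            ++ pvLoopB cl (pvSplit cl (s.length : Int) r).2 := by
        rw [pvLoopB]
        have h0 : ¬ ((0 : Int) > 0 ∧ (0 : Int) + (s.length : Int) > cl) := by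
          intro hh; exact absurd hh.1 (by norm_num)
        simp only [pvSplit, if_neg h0]
        simp [pvEmit, zero_add]
      rw [hloop, ← ih s]
      simp [pvEmit, hbuf]
    · -- no boundary: A extends buffer; B's split takes s
      have hi : ¬ ((buf.length : Int) > 0 ∧ (buf.length : Int) + (s.length : Int) > cl) := by
        intro hh; exact h ⟨by exact_mod_cast hh.1, hh.2⟩
      have hA : pvARes cl (s :: r) buf = pvARes cl r (buf ++ s) := by
        simp only [pvARes, List.foldl]
        have : pvStepA cl (([] : List (List String)), buf) s = ([], buf ++ s) := by
          simp only [pvStepA, if_neg h]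
          simp only [foldl_append_tokens]
        rw [this]
      rw [hA, ih (buf ++ s)]
      simp only [pvSplit, if_neg hi]
      have hlen : ((buf ++ s).length : Int) = (buf.length : Int) + (s.length : Int) := by
        simp
      rw [hlen]
      simp [pvEmit]
  
-- ===== VERDICT (by name: the statement is the Claim_ definition above) =====
theorem chunk_combine_spec : Claim_equal_chunk_combine := by
  intro corpus cl _
  show chunk_combine corpus cl = chunk_combine_alt corpus cl
  have h := main_inv cl corpus []
  simp only [pvARes] at h
  cases corpus with
  | nil => simp [chunk_combine, chunk_combine_alt, pvLoopB]
  | cons s r =>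
    rw [chunk_combine_alt, pvLoopB]
    have h0 : ¬ ((0 : Int) > 0 ∧ (0 : Int) + (s.length : Int) > cl) := by
      intro hh; exact absurd hh.1 (by norm_num)
    rw [chunk_combine]
    simp only [pvSplit, if_neg h0, List.length_nil, Int.natCast_zero] at h ⊢
    simp only [List.nil_append] at h
    rw [h]
    simp [pvEmit, zero_add]
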